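-- pv_equiv track=rewrite | github.com/tdda/tdda | tdda/rexpy/rexpy.py | escaped_bracket
-- ===== SOURCE A (Python) =====
-- def escaped_bracket(chars, dialect=None, inner=False):
--     """
--     Construct a regular expression Bracket (character class),
--     obeying the special regex rules for escaping these:
--
--       - Characters do not, in general need to be escaped
--       - If there is a close bracket ("]") it mst be the first character
--       - If there is a hyphen ("-") it must be the last character
--       - If there is a carat ("^"), it must not be the first character
--       - If there is a backslash, it's probably best to escape it.
--         Some implementations don't require this, but it will rarely
--         do any harm, and most implementation understand at least some
--         escape sequences ("\w", "\W", "\d", "\s" etc.), so escaping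
--         seems prudent.
--
--     However, javascript and ruby do not follow the unescaped "]" as the
--     first character rule, so if either of these dialects is specified,
--     the "]" will be escaped (but still placed in the first position.
--
--     If inner is set to True, the result is returned without brackets.
--     """
--     opener, closer = ('', '') if inner else ('[', ']')
--     if dialect in ('javascript', 'ruby'):
--         prefix = '\]' if ']' in chars else ''
--     else:
--         prefix = ']' if ']' in chars else ''
--     suffix = ((r'\\' if '\\' in chars else '')
--               + ('^' if '^' in chars else '')
--               + ('-' if '-' in chars else ''))
--     specials = r']\-^'
--     mains = ''.join(c for c in chars if c not in specials)
--     return '%s%s%s%s%s' % (opener, prefix, mains, suffix, closer)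
-- ===== SOURCE B (Python) =====
-- def _prio(c):
--     if c == ']':
--         return 0
--     if c == '\\':
--         return 2
--     if c == '^':
--         return 3
--     if c == '-':
--         return 4
--     return 1
--
--
-- def escaped_bracket(chars, dialect=None, inner=False):
--     # Sort-then-scan: stable-sort the characters by positional priority
--     # (']' first, ordinary characters next, then '\', '^', '-'), then render
--     # in one pass, emitting each special at most once (equal specials are
--     # adjacent after the sort) and escaping as the dialect requires.
--     out = [] if inner else ['[']
--     prev = None
--     for c in sorted(chars, key=_prio):
--         if c == prev and _prio(c) != 1:
--             continue
--         prev = c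
--         if c == ']':
--             out.append('\\]' if dialect in ('javascript', 'ruby') else ']')
--         elif c == '\\':
--             out.append('\\\\')
--         else:
--             out.append(c)
--     if not inner:
--         out.append(']')
--     return ''.join(out)
-- ===== Notes on version B (the rewrite author's own statement) =====
-- stated objective: alternative
-- what changed: B stable-sorts the characters by a positional priority key (']' first, ordinary characters, then '\', '^', '-') and renders the sorted sequence in a single pass that emits each special at most once and escapes per dialect, instead of A's four independent membership scans plus a filtering comprehension and template assembly.
import Mathlib
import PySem

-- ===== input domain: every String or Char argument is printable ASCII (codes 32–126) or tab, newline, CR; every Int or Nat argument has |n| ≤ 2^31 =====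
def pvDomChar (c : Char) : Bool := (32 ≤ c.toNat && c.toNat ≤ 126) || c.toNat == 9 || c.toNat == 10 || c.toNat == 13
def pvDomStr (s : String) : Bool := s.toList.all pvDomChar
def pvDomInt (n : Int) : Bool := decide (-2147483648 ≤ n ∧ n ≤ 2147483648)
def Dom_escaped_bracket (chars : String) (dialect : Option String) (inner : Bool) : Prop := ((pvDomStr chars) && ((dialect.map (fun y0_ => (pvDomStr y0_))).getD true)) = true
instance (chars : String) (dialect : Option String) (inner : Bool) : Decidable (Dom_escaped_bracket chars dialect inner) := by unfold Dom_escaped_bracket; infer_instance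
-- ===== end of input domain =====

-- B stable-sorts the characters by positional priority and renders in one pass
-- (sort-then-scan), replacing A's four membership scans plus filtering comprehension
-- (alternative algorithm, same cost).


-- ===== PORT A =====
-- ''']' in chars'' etc. on a single character is exactly List.contains on chars.toList.
def escaped_bracket (chars : String) (dialect : Option String) (inner : Bool) : String :=
  let opener : List Char := if inner then [] else ['[']
  let closer : List Char := if inner then [] else [']']
  let prefix_ : List Char :=
    if dialect = some "javascript" ∨ dialect = some "ruby" then
      (if chars.toList.contains ']' then ['\\', ']'] else [])
    else
      (if chars.toList.contains ']' then [']'] else [])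
  let suffix : List Char :=
    (if chars.toList.contains '\\' then ['\\', '\\'] else [])
    ++ (if chars.toList.contains '^' then ['^'] else [])
    ++ (if chars.toList.contains '-' then ['-'] else [])
  -- specials = r']\-^'
  let mains : List Char :=
    chars.toList.filter (fun c => !(c == ']' || c == '\\' || c == '-' || c == '^'))
  String.mk (opener ++ prefix_ ++ mains ++ suffix ++ closer)

-- ===== PORT B =====
-- _prio(c): the positional priority used as the sort key
def ebPrio (c : Char) : Int :=
  if c = ']' then 0
  else if c = '\\' then 2
  else if c = '^' then 3
  else if c = '-' then 4
  else 1

-- one iteration of B's rendering loop: state = (prev, out)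
def ebStep (dialect : Option String) (st : Option Char × List Char) (c : Char) :
    Option Char × List Char :=
  if st.1 = some c ∧ ebPrio c ≠ 1 then st
  else
    (some c,
      if c = ']' then
        st.2 ++ (if dialect = some "javascript" ∨ dialect = some "ruby" then ['\\', ']'] else [']'])
      else if c = '\\' then st.2 ++ ['\\', '\\']
      else st.2 ++ [c])

def escaped_bracket_alt (chars : String) (dialect : Option String) (inner : Bool) : String :=
  let init : List Char := if inner then [] else ['[']
  let st := (PySem.List.sorted chars.toList ebPrio false).foldl (ebStep dialect) (none, init)
  String.mk (if inner then st.2 else st.2 ++ [']'])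

-- ===== PRECONDITION & SPEC =====
def Spec_escaped_bracket (chars : String) (dialect : Option String) (inner : Bool) (out : String) : Prop := out = escaped_bracket_alt chars dialect inner
instance (chars : String) (dialect : Option String) (inner : Bool) (out : String) : Decidable (Spec_escaped_bracket chars dialect inner out) := by unfold Spec_escaped_bracket; infer_instance

-- ===== CLAIM (what is proved, stated in full; the proofs are below) =====
def Claim_equal_escaped_bracket : Prop := ∀ (chars : String) (dialect : Option String) (inner : Bool), Dom_escaped_bracket chars dialect inner → Spec_escaped_bracket chars dialect inner (escaped_bracket chars dialect inner)

-- ===== LEMMAS AND PROOFS =====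

-- what a single character renders to
def ebRender (dialect : Option String) (c : Char) : List Char :=
  if c = ']' then
    (if dialect = some "javascript" ∨ dialect = some "ruby" then ['\\', ']'] else [']'])
  else if c = '\\' then ['\\', '\\']
  else [c]

-- insertBy walks past a block of elements none of which x goes before
theorem insertBy_append_not_before {α : Type} (before : α → α → Bool) (x : α)
    (A B : List α) (h : ∀ a ∈ A, before x a = false) :
    PySem.List.insertBy before x (A ++ B) = A ++ PySem.List.insertBy before x B := by
  induction A with
  | nil => simp
  | cons a t ih =>
    simp only [List.cons_append, PySem.List.insertBy, h a (by simp)]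
    simp [ih (fun a ha => h a (by simp [ha]))]

-- insertBy puts x in front of a block whose every element x goes before
theorem insertBy_all_before {α : Type} (before : α → α → Bool) (x : α)
    (B : List α) (h : ∀ b ∈ B, before x b = true) :
    PySem.List.insertBy before x B = x :: B := by
  cases B with
  | nil => rfl
  | cons b t => simp [PySem.List.insertBy, h b (by simp)]

-- the five priority groups of a list
def ebPart (i : Int) (l : List Char) : List Char := l.filter (fun c => ebPrio c = i)

theorem ebPrio_cases (c : Char) :
    ebPrio c = 0 ∨ ebPrio c = 1 ∨ ebPrio c = 2 ∨ ebPrio c = 3 ∨ ebPrio c = 4 := by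
  unfold ebPrio; split_ifs <;> simp

-- stable sort by ebPrio is exactly the concatenation of the five groups
theorem sorted_ebPrio_eq_parts (l : List Char) :
    PySem.List.sorted l ebPrio false =
      ebPart 0 l ++ ebPart 1 l ++ ebPart 2 l ++ ebPart 3 l ++ ebPart 4 l := by
  rw [PySem.List.sorted_eq_foldl_insertBy]
  induction l using List.reverseRecOn with
  | nil => simp [ebPart]
  | append_singleton t x ih =>
    rw [List.foldl_append, List.foldl_cons, List.foldl_nil, ih]
    have hpart : ∀ i : Int, ebPart i (t ++ [x]) =
        ebPart i t ++ (if ebPrio x = i then [x] else []) := by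
      intro i; simp only [ebPart, List.filter_append]; split_ifs with h <;> simp [h]
    have hgrp : ∀ i : Int, ∀ a ∈ ebPart i t, ebPrio a = i := by
      intro i a ha; exact of_decide_eq_true (List.mem_filter.1 ha).2
    have hskip : ∀ i : Int, i ≤ ebPrio x → ∀ a ∈ ebPart i t,
        (decide (ebPrio x < ebPrio a)) = false := by
      intro i hi a ha
      have := hgrp i a ha
      simp [this]; omega
    have hbefore : ∀ i : Int, ebPrio x < i → ∀ a ∈ ebPart i t,
        (decide (ebPrio x < ebPrio a)) = true := by
      intro i hi a ha
      have := hgrp i a ha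
      simp [this]; omega
    simp only [hpart]
    rcases ebPrio_cases x with h | h | h | h | h <;> simp only [h] <;> norm_num
    · rw [insertBy_append_not_before _ _ _ _ (hskip 0 (by omega))]
      rw [insertBy_all_before _ _ _
          (by intro b hb
              rcases List.mem_append.1 hb with hb | hb
              · exact hbefore 1 (by omega) _ hb
              rcases List.mem_append.1 hb with hb | hb
              · exact hbefore 2 (by omega) _ hb
              rcases List.mem_append.1 hb with hb | hb
              · exact hbefore 3 (by omega) _ hb
              · exact hbefore 4 (by omega) _ hb)]
    · rw [insertBy_append_not_before _ _ _ _ (hskip 0 (by omega))]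
      rw [insertBy_append_not_before _ _ _ _ (hskip 1 (by omega))]
      rw [insertBy_all_before _ _ _
          (by intro b hb
              rcases List.mem_append.1 hb with hb | hb
              · exact hbefore 2 (by omega) _ hb
              rcases List.mem_append.1 hb with hb | hb
              · exact hbefore 3 (by omega) _ hb
              · exact hbefore 4 (by omega) _ hb)]
    · rw [insertBy_append_not_before _ _ _ _ (hskip 0 (by omega))]
      rw [insertBy_append_not_before _ _ _ _ (hskip 1 (by omega))]
      rw [insertBy_append_not_before _ _ _ _ (hskip 2 (by omega))]
      rw [insertBy_all_before _ _ _
          (by intro b hb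
              rcases List.mem_append.1 hb with hb | hb
              · exact hbefore 3 (by omega) _ hb
              · exact hbefore 4 (by omega) _ hb)]
    · rw [insertBy_append_not_before _ _ _ _ (hskip 0 (by omega))]
      rw [insertBy_append_not_before _ _ _ _ (hskip 1 (by omega))]
      rw [insertBy_append_not_before _ _ _ _ (hskip 2 (by omega))]
      rw [insertBy_append_not_before _ _ _ _ (hskip 3 (by omega))]
      rw [insertBy_all_before _ _ _ (by intro b hb; exact hbefore 4 (by omega) _ hb)]
    · rw [insertBy_append_not_before _ _ _ _ (hskip 0 (by omega))]
      rw [insertBy_append_not_before _ _ _ _ (hskip 1 (by omega))]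
      rw [insertBy_append_not_before _ _ _ _ (hskip 2 (by omega))]
      rw [insertBy_append_not_before _ _ _ _ (hskip 3 (by omega))]
      rw [PySem.List.insertBy_of_forall_not_before _ _ _ (hskip 4 (by omega))]

-- the rendering loop over a block of equal specials: skips all but the first
theorem fold_replicate_special (d : Option String) (x : Char) (n : Nat)
    (p : Option Char) (out : List Char) (hx : ebPrio x ≠ 1) (hp : p ≠ some x) :
    (List.replicate n x).foldl (ebStep d) (p, out) =
      ((if n = 0 then p else some x), out ++ (if n = 0 then [] else ebRender d x)) := by
  cases n with
  | zero => simp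
  | succ m =>
    have hstep : ebStep d (p, out) x = (some x, out ++ ebRender d x) := by
      simp only [ebStep, ebRender]
      rw [if_neg (by simp [hp])]
      split_ifs <;> rfl
    have hskip : ∀ k (o : List Char),
        (List.replicate k x).foldl (ebStep d) (some x, o) = (some x, o) := by
      intro k; induction k with
      | zero => simp
      | succ j ihj => intro o; simp [List.replicate_succ, ebStep, hx, ihj]
    simp only [List.replicate_succ, List.foldl_cons, hstep, hskip]
    simp

-- the rendering loop over the ordinary characters: appends them all
theorem fold_mains (d : Option String) (M : List Char) (p : Option Char)
    (out : List Char) (hM : ∀ c ∈ M, ebPrio c = 1) :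
    M.foldl (ebStep d) (p, out) = (M.foldl (fun _ c => some c) p, out ++ M) := by
  induction M generalizing p out with
  | nil => simp
  | cons c t ih =>
    have hc := hM c (by simp)
    have hc1 : c ≠ ']' := by intro h; rw [h] at hc; simp [ebPrio] at hc
    have hc2 : c ≠ '\\' := by intro h; rw [h] at hc; simp [ebPrio] at hc
    have hstep : ebStep d (p, out) c = (some c, out ++ [c]) := by
      simp [ebStep, hc, hc1, hc2]
    simp only [List.foldl_cons, hstep, ih _ _ (fun a ha => hM a (by simp [ha]))]
    simp

-- a group of a single special character is a replicate of its count
theorem ebPart_special (i : Int) (x : Char) (l : List Char)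
    (hx : ebPrio x = i) (hu : ∀ c : Char, ebPrio c = i → c = x) :
    ebPart i l = List.replicate (l.count x) x := by
  have : ebPart i l = l.filter (fun c => c == x) := by
    apply List.filter_congr
    intro c _
    by_cases h : c = x
    · simp [h, hx]
    · have h2 : ¬ ebPrio c = i := fun hc => h (hu c hc)
      simp [h, h2]
  rw [this, List.filter_beq]

-- the prev marker after the ordinary-character block still has priority ≤ i
theorem foldl_prev_bound (M : List Char) (p : Option Char) (i : Int)
    (hM : ∀ c ∈ M, ebPrio c = 1) (hp : ∀ c, p = some c → ebPrio c ≤ i) (hi : 1 ≤ i) :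
    ∀ c, M.foldl (fun _ c => some c) p = some c → ebPrio c ≤ i := by
  induction M generalizing p with
  | nil => exact hp
  | cons a t ih =>
    intro c hc
    refine ih _ (fun b hb => hM b (by simp [hb])) ?_ c hc
    intro b hb
    rw [Option.some.injEq] at hb
    rw [← hb, hM a (by simp)]
    exact hi

-- B's whole rendering loop computes A's prefix/mains/suffix concatenation
theorem eb_core (l : List Char) (d : Option String) (init : List Char) :
    ((PySem.List.sorted l ebPrio false).foldl (ebStep d) (none, init)).2 =
      init
      ++ (if l.contains ']' then
            (if d = some "javascript" ∨ d = some "ruby" then ['\\', ']'] else [']']) else [])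
      ++ l.filter (fun c => !(c == ']' || c == '\\' || c == '-' || c == '^'))
      ++ (if l.contains '\\' then ['\\', '\\'] else [])
      ++ (if l.contains '^' then ['^'] else [])
      ++ (if l.contains '-' then ['-'] else []) := by
  rw [sorted_ebPrio_eq_parts]
  have hP0 : ebPart 0 l = List.replicate (l.count ']') ']' :=
    ebPart_special 0 ']' l (by decide)
      (by intro c hc; unfold ebPrio at hc; split_ifs at hc with h1 h2 h3 h4 <;>
            first | exact h1 | exact absurd hc (by norm_num))
  have hP2 : ebPart 2 l = List.replicate (l.count '\\') '\\' :=
    ebPart_special 2 '\\' l (by decide)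
      (by intro c hc; unfold ebPrio at hc; split_ifs at hc with h1 h2 h3 h4 <;>
            first | exact h2 | exact absurd hc (by norm_num))
  have hP3 : ebPart 3 l = List.replicate (l.count '^') '^' :=
    ebPart_special 3 '^' l (by decide)
      (by intro c hc; unfold ebPrio at hc; split_ifs at hc with h1 h2 h3 h4 <;>
            first | exact h3 | exact absurd hc (by norm_num))
  have hP4 : ebPart 4 l = List.replicate (l.count '-') '-' :=
    ebPart_special 4 '-' l (by decide)
      (by intro c hc; unfold ebPrio at hc; split_ifs at hc with h1 h2 h3 h4 <;>
            first | exact h4 | exact absurd hc (by norm_num))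
  have hP1 : ebPart 1 l = l.filter (fun c => !(c == ']' || c == '\\' || c == '-' || c == '^')) := by
    apply List.filter_congr
    intro c _
    unfold ebPrio
    split_ifs with h1 h2 h3 h4 <;> simp_all
  have hM1 : ∀ c ∈ ebPart 1 l, ebPrio c = 1 := by
    intro c hc; exact of_decide_eq_true (List.mem_filter.1 hc).2
  rw [List.foldl_append, List.foldl_append, List.foldl_append, List.foldl_append]
  rw [hP0, fold_replicate_special d ']' _ none init (by decide) (by simp)]
  set q0 : Option Char := if l.count ']' = 0 then none else some ']' with hq0def
  set o0 : List Char := init ++ (if l.count ']' = 0 then [] else ebRender d ']') with ho0def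
  have hq0 : ∀ c, q0 = some c → ebPrio c ≤ 1 := by
    rw [hq0def]; split_ifs <;> intro c hc <;> simp_all
    rw [← hc]; decide
  rw [fold_mains d _ _ _ hM1]
  set q1 : Option Char := (ebPart 1 l).foldl (fun _ c => some c) q0 with hq1def
  have hq1 : ∀ c, q1 = some c → ebPrio c ≤ 1 :=
    foldl_prev_bound _ _ _ hM1 hq0 (by omega)
  rw [hP2, fold_replicate_special d '\\' _ q1 _ (by decide)
        (by intro h; have := hq1 _ h; rw [show ebPrio '\\' = 2 from by decide] at this; omega)]
  set q2 : Option Char := if l.count '\\' = 0 then q1 else some '\\' with hq2def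
  have hq2 : ∀ c, q2 = some c → ebPrio c ≤ 2 := by
    rw [hq2def]; split_ifs with h <;> intro c hc
    · have := hq1 c hc; omega
    · rw [Option.some.injEq] at hc; rw [← hc]; decide
  rw [hP3, fold_replicate_special d '^' _ q2 _ (by decide)
        (by intro h; have := hq2 _ h; rw [show ebPrio '^' = 3 from by decide] at this; omega)]
  set q3 : Option Char := if l.count '^' = 0 then q2 else some '^' with hq3def
  have hq3 : ∀ c, q3 = some c → ebPrio c ≤ 3 := by
    rw [hq3def]; split_ifs with h <;> intro c hc
    · have := hq2 c hc; omega
    · rw [Option.some.injEq] at hc; rw [← hc]; decide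
  rw [hP4, fold_replicate_special d '-' _ q3 _ (by decide)
        (by intro h; have := hq3 _ h; rw [show ebPrio '-' = 4 from by decide] at this; omega)]
  simp only [ho0def, hP1]
  have hcnt : ∀ a : Char, (l.count a = 0) = ¬ l.contains a := by
    intro a; simp [List.count_eq_zero]
  simp [hcnt, ebRender]

-- ===== VERDICT (by name: the statement is the Claim_ definition above) =====
theorem escaped_bracket_spec : Claim_equal_escaped_bracket := by
  intro chars dialect inner _
  unfold Spec_escaped_bracket escaped_bracket escaped_bracket_alt
  cases inner <;>
    by_cases hd : dialect = some "javascript" ∨ dialect = some "ruby" <;>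
    by_cases hm : ']' ∈ chars.toList <;>
    simp [eb_core, hd, hm]
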